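-- pv_equiv track=rewrite | github.com/zahaale20/esod2.0 | scripts/data_prepare.py | check_break
-- ===== SOURCE A (Python) =====
-- def check_break(act):
--     flag = False
--     prev_pos, prev_neg = False, False
--     for x in act:
--         if x:
--             if not prev_pos:
--                 prev_pos = True
--             elif prev_neg:
--                 flag = True
--                 break
--         elif prev_pos:
--             prev_neg = True
--
--     return flag
-- ===== SOURCE B (Python) =====
-- def check_break(act):
--     it = iter(act)
--     for x in it:
--         if x:
--             break
--     else:
--         return False
--     for x in it:
--         if not x:
--             break
--     else:
--         return False
--     for x in it:
--         if x:
--             return True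
--     return False
-- ===== Notes on version B (the rewrite author's own statement) =====
-- stated objective: simpler
-- what changed: Replaced the single flag-driven loop (prev_pos/prev_neg booleans) with three sequential phase scans over one shared iterator: find a True, then a False, then a True.
import Mathlib
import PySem

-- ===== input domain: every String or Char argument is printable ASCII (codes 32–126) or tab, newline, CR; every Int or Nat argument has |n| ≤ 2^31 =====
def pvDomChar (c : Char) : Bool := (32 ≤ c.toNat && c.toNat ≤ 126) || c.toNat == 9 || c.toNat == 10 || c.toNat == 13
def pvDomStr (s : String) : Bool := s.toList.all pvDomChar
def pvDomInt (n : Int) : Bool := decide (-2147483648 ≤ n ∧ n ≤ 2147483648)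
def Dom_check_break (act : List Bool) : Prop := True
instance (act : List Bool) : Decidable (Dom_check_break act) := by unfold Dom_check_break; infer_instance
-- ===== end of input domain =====

-- B restructures A's one flag-driven loop into three sequential phase scans; return value only, no side effects.

-- ===== PORT A =====
-- the for-loop of A, carrying the prev_pos / prev_neg flags; break = return true
def checkBreakLoop : List Bool → Bool → Bool → Bool
  | [], _, _ => false
  | x :: xs, prev_pos, prev_neg =>
    if x then
      if !prev_pos then checkBreakLoop xs true prev_neg
      else if prev_neg then true
      else checkBreakLoop xs prev_pos prev_neg
    else if prev_pos then checkBreakLoop xs prev_pos true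
    else checkBreakLoop xs prev_pos prev_neg

def check_break (act : List Bool) : Bool := checkBreakLoop act false false

-- ===== PORT B =====
-- phase 1: consume up to and including the first truthy element; none = for…else return False
def cbPhase1 : List Bool → Option (List Bool)
  | [] => none
  | x :: xs => if x then some xs else cbPhase1 xs

-- phase 2: consume up to and including the next falsy element
def cbPhase2 : List Bool → Option (List Bool)
  | [] => none
  | x :: xs => if !x then some xs else cbPhase2 xs

-- phase 3: any remaining truthy element?
def cbPhase3 : List Bool → Bool
  | [] => false
  | x :: xs => if x then true else cbPhase3 xs

def check_break_alt (act : List Bool) : Bool :=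
  match cbPhase1 act with
  | none => false
  | some r1 =>
    match cbPhase2 r1 with
    | none => false
    | some r2 => cbPhase3 r2

-- ===== PRECONDITION & SPEC =====
def Spec_check_break (act : List Bool) (out : Bool) : Prop := out = check_break_alt act
instance (act : List Bool) (out : Bool) : Decidable (Spec_check_break act out) := by unfold Spec_check_break; infer_instance

-- ===== CLAIM (what is proved, stated in full; the proofs are below) =====
def Claim_equal_check_break : Prop := ∀ (act : List Bool), Dom_check_break act → Spec_check_break act (check_break act)

-- ===== LEMMAS AND PROOFS =====
theorem loop_tt_tt (xs : List Bool) : checkBreakLoop xs true true = cbPhase3 xs := by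
  induction xs with
  | nil => rfl
  | cons x xs ih =>
    cases x <;> simp [checkBreakLoop, cbPhase3, ih]

theorem loop_tt_ff (xs : List Bool) :
    checkBreakLoop xs true false =
      (match cbPhase2 xs with | none => false | some r => cbPhase3 r) := by
  induction xs with
  | nil => rfl
  | cons x xs ih =>
    cases x <;> simp [checkBreakLoop, cbPhase2, ih, loop_tt_tt]

theorem loop_ff_ff (xs : List Bool) : checkBreakLoop xs false false = check_break_alt xs := by
  induction xs with
  | nil => rfl
  | cons x xs ih =>
    cases x <;> simp [checkBreakLoop, check_break_alt, cbPhase1, ih, loop_tt_ff]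

-- ===== VERDICT (by name: the statement is the Claim_ definition above) =====
theorem check_break_spec : Claim_equal_check_break := by
  intro act _
  unfold Spec_check_break check_break
  exact loop_ff_ff act
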